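-- pv_equiv track=rewrite | github.com/gustavorh/tuplas-dentro-de-listas | Tuplas dentro de Listas.py | productos_con_mas_ingresos
-- ===== SOURCE A (Python) =====
-- def productos_con_mas_ingresos(lista_productos, lista_items):
--     codigos = {}
--     for i in lista_items:
--         _, codigo, cantidad = i
--         if codigo not in codigos:
--             codigos[codigo] = cantidad
--         else:
--             codigos[codigo] += cantidad
--     mas_ingresos = 0
--     nombre_prod_mas_ingreso = ""
--     for j in lista_productos:
--         cod_prod, nombre_prod, precio_prod, _ = j
--         if cod_prod in codigos:
--             total = precio_prod * codigos[cod_prod]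
--             if total > mas_ingresos:
--                 mas_ingresos = total
--                 nombre_prod_mas_ingreso = nombre_prod
--     return nombre_prod_mas_ingreso
-- ===== SOURCE B (Python) =====
-- def productos_con_mas_ingresos(lista_productos, lista_items):
--     mas_ingresos = 0
--     nombre = ""
--     for cod_prod, nombre_prod, precio_prod, _ in lista_productos:
--         vendidos = 0
--         for _, codigo, cantidad in lista_items:
--             if codigo == cod_prod:
--                 vendidos += cantidad
--         total = precio_prod * vendidos
--         if total > mas_ingresos:
--             mas_ingresos = total
--             nombre = nombre_prod
--     return nombre
-- ===== Notes on version B (the rewrite author's own statement) =====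
-- stated objective: alternative
-- what changed: Drops the pre-aggregated quantities dict: for each product the sold quantity is computed by a direct scan of lista_items, keeping the same strict running-max; a product whose code never occurs sums to 0 and so never beats the non-negative running max, matching A's skip.
import Mathlib
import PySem

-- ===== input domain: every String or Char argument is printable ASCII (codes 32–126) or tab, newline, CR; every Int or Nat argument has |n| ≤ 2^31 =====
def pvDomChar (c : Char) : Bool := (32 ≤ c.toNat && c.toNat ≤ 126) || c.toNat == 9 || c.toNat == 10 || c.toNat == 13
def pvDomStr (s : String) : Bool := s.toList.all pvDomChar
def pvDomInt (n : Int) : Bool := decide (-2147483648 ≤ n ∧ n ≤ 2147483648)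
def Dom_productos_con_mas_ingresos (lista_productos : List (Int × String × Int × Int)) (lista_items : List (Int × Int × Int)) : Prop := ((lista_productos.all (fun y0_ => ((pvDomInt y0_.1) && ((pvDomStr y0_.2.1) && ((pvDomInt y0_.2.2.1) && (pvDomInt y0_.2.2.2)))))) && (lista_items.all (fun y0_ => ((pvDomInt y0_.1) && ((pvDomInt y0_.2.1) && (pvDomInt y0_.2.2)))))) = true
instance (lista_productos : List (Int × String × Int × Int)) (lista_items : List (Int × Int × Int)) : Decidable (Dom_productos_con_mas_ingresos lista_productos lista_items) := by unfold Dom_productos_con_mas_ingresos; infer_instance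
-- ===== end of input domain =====

-- B drops A's pre-aggregated quantities dict and instead scans lista_items once per
-- product to sum its sold quantity, keeping the same strict running-max (alternative
-- decomposition, not faster).

-- ===== PORT A =====
def productos_con_mas_ingresos (lista_productos : List (Int × String × Int × Int)) (lista_items : List (Int × Int × Int)) : String :=
  let codigos : PySem.Dict Int Int := lista_items.foldl (fun codigos i =>
      if !codigos.contains i.2.1 then codigos.insert i.2.1 i.2.2
      else codigos.modify i.2.1 0 (· + i.2.2)) PySem.Dict.empty
  (lista_productos.foldl (fun acc j =>
      if codigos.contains j.1 then
        let total := j.2.2.1 * codigos.getD j.1 0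
        if total > acc.1 then (total, j.2.1) else acc
      else acc) ((0 : Int), "")).2

-- ===== PORT B =====
def productos_con_mas_ingresos_alt (lista_productos : List (Int × String × Int × Int)) (lista_items : List (Int × Int × Int)) : String :=
  (lista_productos.foldl (fun acc j =>
      let vendidos := lista_items.foldl (fun s i => if i.2.1 == j.1 then s + i.2.2 else s) (0 : Int)
      let total := j.2.2.1 * vendidos
      if total > acc.1 then (total, j.2.1) else acc) ((0 : Int), "")).2

-- ===== PRECONDITION & SPEC =====
def Spec_productos_con_mas_ingresos (lista_productos : List (Int × String × Int × Int)) (lista_items : List (Int × Int × Int)) (out : String) : Prop := out = productos_con_mas_ingresos_alt lista_productos lista_items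
instance (lista_productos : List (Int × String × Int × Int)) (lista_items : List (Int × Int × Int)) (out : String) : Decidable (Spec_productos_con_mas_ingresos lista_productos lista_items out) := by unfold Spec_productos_con_mas_ingresos; infer_instance

-- ===== CLAIM (what is proved, stated in full; the proofs are below) =====
def Claim_equal_productos_con_mas_ingresos : Prop := ∀ (lista_productos : List (Int × String × Int × Int)) (lista_items : List (Int × Int × Int)), Dom_productos_con_mas_ingresos lista_productos lista_items → Spec_productos_con_mas_ingresos lista_productos lista_items (productos_con_mas_ingresos lista_productos lista_items)

-- ===== LEMMAS AND PROOFS =====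

-- total quantity sold of code c in the item list
def pvSumQ (c : Int) : List (Int × Int × Int) → Int
  | [] => 0
  | i :: t => (if i.2.1 = c then i.2.2 else 0) + pvSumQ c t

theorem pv_inner_sum (c : Int) : ∀ (li : List (Int × Int × Int)) (s : Int),
    li.foldl (fun s i => if i.2.1 == c then s + i.2.2 else s) s = s + pvSumQ c li := by
  intro li
  induction li with
  | nil => intro s; simp [pvSumQ]
  | cons i t ih =>
    intro s
    simp only [List.foldl_cons, pvSumQ, ih]
    by_cases h : i.2.1 = c <;> simp [h] <;> ring

theorem pv_build_getD : ∀ (li : List (Int × Int × Int)) (d : PySem.Dict Int Int) (c : Int),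
    (li.foldl (fun codigos i =>
      if !codigos.contains i.2.1 then codigos.insert i.2.1 i.2.2
      else codigos.modify i.2.1 0 (· + i.2.2)) d).getD c 0 = d.getD c 0 + pvSumQ c li := by
  intro li
  induction li with
  | nil => intro d c; simp [pvSumQ]
  | cons i t ih =>
    intro d c
    simp only [List.foldl_cons, ih, pvSumQ]
    by_cases hc : d.contains i.2.1
    · have hb : (!d.contains i.2.1) = false := by simp [hc]
      rw [hb]
      simp only [Bool.false_eq_true, if_false]
      rw [PySem.Dict.getD_modify]
      by_cases h : i.2.1 = c
      · subst h; simp; ring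
      · simp [h, Ne.symm h]
    · simp only [Bool.not_eq_true] at hc
      have hb : (!d.contains i.2.1) = true := by simp [hc]
      rw [hb, if_pos rfl]
      rw [PySem.Dict.getD_insert]
      by_cases h : i.2.1 = c
      · have h0 : d.getD c 0 = 0 := PySem.Dict.getD_of_not_contains d 0 (by rw [← h]; exact hc)
        simp [h, h0]
      · simp [h, Ne.symm h]

theorem pv_build_contains : ∀ (li : List (Int × Int × Int)) (d : PySem.Dict Int Int) (c : Int),
    (li.foldl (fun codigos i =>
      if !codigos.contains i.2.1 then codigos.insert i.2.1 i.2.2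
      else codigos.modify i.2.1 0 (· + i.2.2)) d).contains c
    = (d.contains c || li.any (fun i => i.2.1 == c)) := by
  intro li
  induction li with
  | nil => intro d c; simp
  | cons i t ih =>
    intro d c
    simp only [List.foldl_cons, ih, List.any_cons]
    by_cases hc : d.contains i.2.1
    · have hb : (!d.contains i.2.1) = false := by simp [hc]
      rw [hb]
      simp only [Bool.false_eq_true, if_false, PySem.Dict.contains_modify]
      by_cases h : i.2.1 = c
      · rw [← h]
        simp [hc]
      · have h1 : (c == i.2.1) = false := by simp [Ne.symm h]
        have h2 : (i.2.1 == c) = false := by simp [h]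
        rw [h1, h2]
        simp
    · simp only [Bool.not_eq_true] at hc
      have hb : (!d.contains i.2.1) = true := by simp [hc]
      rw [hb, if_pos rfl, PySem.Dict.contains_insert]
      by_cases h : i.2.1 = c
      · simp [h]
      · have h1 : (c == i.2.1) = false := by simp [Ne.symm h]
        have h2 : (i.2.1 == c) = false := by simp [h]
        rw [h1, h2]
        simp

theorem pv_sumQ_zero (c : Int) : ∀ (li : List (Int × Int × Int)),
    li.any (fun i => i.2.1 == c) = false → pvSumQ c li = 0 := by
  intro li
  induction li with
  | nil => intro _; rfl
  | cons i t ih =>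
    intro h
    simp only [List.any_cons, Bool.or_eq_false_iff, beq_eq_false_iff_ne] at h
    simp [pvSumQ, h.1, ih (by simp [h.2])]


theorem pv_main (li : List (Int × Int × Int)) (d : PySem.Dict Int Int)
    (hg : ∀ c, d.getD c 0 = pvSumQ c li)
    (hcnt : ∀ c, d.contains c = li.any (fun i => i.2.1 == c)) :
    ∀ (lp : List (Int × String × Int × Int)) (acc : Int × String), 0 ≤ acc.1 →
    lp.foldl (fun acc j =>
      if d.contains j.1 then
        let total := j.2.2.1 * d.getD j.1 0
        if total > acc.1 then (total, j.2.1) else acc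
      else acc) acc
    = lp.foldl (fun acc j =>
      let vendidos := li.foldl (fun s i => if i.2.1 == j.1 then s + i.2.2 else s) (0 : Int)
      let total := j.2.2.1 * vendidos
      if total > acc.1 then (total, j.2.1) else acc) acc := by
  intro lp
  induction lp with
  | nil => intro acc _; rfl
  | cons j t ih =>
    intro acc hacc
    simp only [List.foldl_cons]
    have hv : li.foldl (fun s i => if i.2.1 == j.1 then s + i.2.2 else s) (0 : Int)
        = pvSumQ j.1 li := by
      rw [pv_inner_sum]; ring
    have hstep : (if d.contains j.1 then
          let total := j.2.2.1 * d.getD j.1 0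
          if total > acc.1 then (total, j.2.1) else acc
        else acc)
        = (let vendidos := li.foldl (fun s i => if i.2.1 == j.1 then s + i.2.2 else s) (0 : Int)
           let total := j.2.2.1 * vendidos
           if total > acc.1 then (total, j.2.1) else acc) := by
      simp only [hv, hg j.1]
      by_cases hc : d.contains j.1
      · simp [hc]
      · have hz : pvSumQ j.1 li = 0 :=
          pv_sumQ_zero j.1 li (by rw [← hcnt j.1]; simp [hc])
        have hnl : ¬ ((0 : Int) > acc.1) := by omega
        simp [hc, hz, hnl]
    have hpos : ∀ (total : Int) (nom : String), 0 ≤ (if total > acc.1 then (total, nom) else acc).1 := by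
      intro total nom
      by_cases hlt : total > acc.1
      · simpa [hlt] using le_of_lt (lt_of_le_of_lt hacc hlt)
      · simpa [hlt] using hacc
    rw [hstep]
    exact ih _ (hpos _ _)

-- ===== VERDICT (by name: the statement is the Claim_ definition above) =====
theorem productos_con_mas_ingresos_spec : Claim_equal_productos_con_mas_ingresos := by
  intro lista_productos lista_items _
  unfold Spec_productos_con_mas_ingresos productos_con_mas_ingresos productos_con_mas_ingresos_alt
  exact congrArg Prod.snd (pv_main lista_items _
    (fun c => by rw [pv_build_getD]; simp)
    (fun c => by rw [pv_build_contains]; simp)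
    lista_productos ((0 : Int), "") le_rfl)
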